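-- pv_equiv track=rewrite | github.com/benjitusk/DinnerApp | app.py | makeBold
-- ===== SOURCE A (Python) =====
-- def makeBold(message):
--     # Warning: The output of this function
--     # marked as TRUSTED HTML. Make sure
--     # we are protected against XSS attacks.
--     message=str(message)
--     message=message.replace("<", "&lt;")
--     message=message.replace(">", "&gt;")
--     message=message.replace("&", "&amp;")
--     message=message.replace("\"", "&quot;")
--     message=message.replace("'", "&#39;")
--     message = list(message)
--     count = 0
--     number_of_asterics = 0
--     asteric_index = []
--     for char in message:
--         if char == "*":
--             number_of_asterics += 1
--             asteric_index.append(count)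
--         count += 1
--     if number_of_asterics % 2 == 1:
--         asteric_index.pop()
--     count=0
--     for asteric in asteric_index:
--         if count % 2==0:
--             message[asteric] = "<b>"
--         else:
--             message[asteric] = "</b>"
--         count += 1
--     def convert_back_to_string(list_of_chars):
--         new = ""
--         for x in list_of_chars:
--             new += x
--         return new
--     return convert_back_to_string(message)
-- ===== SOURCE B (Python) =====
-- def makeBold(message):
--     # Split/join algorithm: same escaping chain (its order is load-bearing),
--     # then split on '*' and rejoin the pieces with alternating tags; the
--     # unpaired trailing asterisk (odd count) is re-emitted literally.
--     message = str(message)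
--     message = message.replace("<", "&lt;")
--     message = message.replace(">", "&gt;")
--     message = message.replace("&", "&amp;")
--     message = message.replace("\"", "&quot;")
--     message = message.replace("'", "&#39;")
--     parts = message.split("*")
--     n = len(parts) - 1          # number of asterisks
--     limit = n - n % 2           # pair them up, dropping an unpaired last one
--     pieces = []
--     for i, p in enumerate(parts):
--         if i < limit:
--             pieces += [p, "<b>" if i % 2 == 0 else "</b>"]
--         elif i < n:
--             pieces += [p, "*"]
--         else:
--             pieces += [p]
--     return "".join(pieces)
-- ===== Notes on version B (the rewrite author's own statement) =====
-- stated objective: faster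
-- what changed: A scans characters collecting asterisk positions into an index list, mutates a list of 1-char strings in place at those indices and re-concatenates piece by piece; B never builds a per-character list at all: it splits the escaped string on '*' and rejoins the segments with alternating <b>/</b> separators (an unpaired trailing separator is re-emitted unchanged).
import Mathlib
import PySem

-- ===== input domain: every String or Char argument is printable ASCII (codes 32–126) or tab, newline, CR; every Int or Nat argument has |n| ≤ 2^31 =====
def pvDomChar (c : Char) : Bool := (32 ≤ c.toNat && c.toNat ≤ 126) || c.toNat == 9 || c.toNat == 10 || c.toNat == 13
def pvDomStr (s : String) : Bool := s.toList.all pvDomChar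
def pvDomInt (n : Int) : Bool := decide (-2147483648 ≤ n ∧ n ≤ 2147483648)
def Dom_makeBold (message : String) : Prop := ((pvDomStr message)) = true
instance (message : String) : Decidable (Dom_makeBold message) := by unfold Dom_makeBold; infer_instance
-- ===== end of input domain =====

-- B replaces A's character scan + index-list + in-place mutation by a
-- split-on-'*' / rejoin-with-alternating-tags algorithm; the escaping
-- replace-chain (whose non-standard order is load-bearing) is kept verbatim.

-- ===== PORT A =====
-- Python strings are encoded as List Char; 'list(message)' (a list of 1-char
-- strings) is a List (List Char). The Python ints (count, number_of_asterics,
-- the indices) are provably nonnegative, so they are Nats.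
def makeBold (message : String) : String :=
  let m := PySem.Str.replace message "<" "&lt;"
  let m := PySem.Str.replace m ">" "&gt;"
  let m := PySem.Str.replace m "&" "&amp;"
  let m := PySem.Str.replace m "\"" "&quot;"
  let m := PySem.Str.replace m "'" "&#39;"
  let msg0 : List (List Char) := m.toList.map (fun c => [c])
  -- first loop: state (count, number_of_asterics, asteric_index)
  let st1 : Nat × Nat × List Nat :=
    msg0.foldl (fun s ch =>
      if ch = ['*'] then (s.1 + 1, s.2.1 + 1, s.2.2 ++ [s.1])
      else (s.1 + 1, s.2.1, s.2.2)) (0, 0, [])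
  -- pop(): when the count is odd the list is nonempty, so dropLast is exact
  let idx : List Nat := if st1.2.1 % 2 = 1 then st1.2.2.dropLast else st1.2.2
  -- second loop: in-place tag assignment (the collected indices are in range)
  let st2 : List (List Char) × Nat :=
    idx.foldl (fun s a =>
      (s.1.set a (if s.2 % 2 = 0 then "<b>".toList else "</b>".toList), s.2 + 1))
      (msg0, 0)
  -- convert_back_to_string: new += x over the list
  String.ofList (st2.1.foldl (fun acc x => acc ++ x) [])

-- ===== PORT B =====
-- Hand port of message.split("*"): exact for a one-character separator
-- (pieces between occurrences, empty pieces kept, [''] on the empty string).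
def pySplitStar : List Char → List (List Char)
  | [] => [[]]
  | c :: t =>
    match pySplitStar t with
    | [] => [[]]          -- unreachable: the split of any string is nonempty
    | p :: ps => if c = '*' then [] :: p :: ps else (c :: p) :: ps

def makeBold_alt (message : String) : String :=
  let m := PySem.Str.replace message "<" "&lt;"
  let m := PySem.Str.replace m ">" "&gt;"
  let m := PySem.Str.replace m "&" "&amp;"
  let m := PySem.Str.replace m "\"" "&quot;"
  let m := PySem.Str.replace m "'" "&#39;"
  let parts : List (List Char) := pySplitStar m.toList
  let n : Int := (parts.length : Int) - 1
  let limit : Int := n - PySem.Int.mod n 2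
  let pieces : List (List Char) :=
    (PySem.List.enumerate parts).foldl (fun acc ip =>
      if ip.1 < limit then
        acc ++ [ip.2] ++ [if PySem.Int.mod ip.1 2 = 0 then "<b>".toList else "</b>".toList]
      else if ip.1 < n then acc ++ [ip.2] ++ [['*']]
      else acc ++ [ip.2]) []
  -- "".join(pieces): exact for the empty separator
  String.ofList pieces.flatten

-- ===== PRECONDITION & SPEC =====
def Spec_makeBold (message : String) (out : String) : Prop := out = makeBold_alt message
instance (message : String) (out : String) : Decidable (Spec_makeBold message out) := by unfold Spec_makeBold; infer_instance

-- ===== CLAIM =====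
def Claim_equal_makeBold : Prop := ∀ (message : String), Dom_makeBold message → Spec_makeBold message (makeBold message)

-- ===== LEMMAS AND PROOFS =====

def pvPos (cs : List Char) (i : Nat) : List Nat :=
  match cs with
  | [] => []
  | c :: t => if c = '*' then i :: pvPos t (i + 1) else pvPos t (i + 1)

def pvTag (k : Nat) : List Char := if k % 2 = 0 then "<b>".toList else "</b>".toList

def pvCanon (cs : List Char) (seen limit : Nat) : List Char :=
  match cs with
  | [] => []
  | c :: t =>
    if c = '*' ∧ seen < limit then pvTag seen ++ pvCanon t (seen + 1) limit
    else c :: pvCanon t seen limit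

theorem pvPos_shift (cs : List Char) : ∀ i, pvPos cs (i + 1) = (pvPos cs i).map (· + 1) := by
  induction cs with
  | nil => simp [pvPos]
  | cons c t ih => intro i; by_cases h : c = '*' <;> simp [pvPos, h, ih]

theorem pvPos_length (cs : List Char) : ∀ i, (pvPos cs i).length = cs.count '*' := by
  induction cs with
  | nil => simp [pvPos]
  | cons c t ih => intro i; by_cases h : c = '*' <;> simp [pvPos, h, ih]

theorem pvPos_one (cs : List Char) : pvPos cs 1 = (pvPos cs 0).map (· + 1) := by
  simpa using pvPos_shift cs 0

theorem pvMut_shift {x : List Char} (l : List Nat) :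
    ∀ (msg : List (List Char)) (k : Nat),
    ((l.map (· + 1)).foldl (fun (s : List (List Char) × Nat) a =>
      (s.1.set a (if s.2 % 2 = 0 then "<b>".toList else "</b>".toList), s.2 + 1)) (x :: msg, k))
    = (x :: (l.foldl (fun (s : List (List Char) × Nat) a =>
      (s.1.set a (if s.2 % 2 = 0 then "<b>".toList else "</b>".toList), s.2 + 1)) (msg, k)).1,
       (l.foldl (fun (s : List (List Char) × Nat) a =>
      (s.1.set a (if s.2 % 2 = 0 then "<b>".toList else "</b>".toList), s.2 + 1)) (msg, k)).2) := by
  induction l with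
  | nil => simp
  | cons i t ih =>
    intro msg k
    simp only [List.map_cons, List.foldl_cons, List.set_cons_succ]
    exact ih _ _

theorem pvJoin_shift (l : List (List Char)) : ∀ a : List Char,
    l.foldl (fun acc x => acc ++ x) a = a ++ l.foldl (fun acc x => acc ++ x) [] := by
  induction l with
  | nil => simp
  | cons x t ih =>
    intro a
    simp only [List.foldl_cons, List.nil_append]
    rw [ih (a ++ x), ih x, List.append_assoc]

theorem pvJoin_singletons (cs : List Char) :
    (cs.map (fun c => [c])).foldl (fun acc x => acc ++ x) [] = cs := by
  induction cs with
  | nil => simp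
  | cons c t ih =>
    simp only [List.map_cons, List.foldl_cons, List.nil_append]
    rw [pvJoin_shift, ih]
    simp

theorem pvCanon_stop (cs : List Char) : ∀ k limit, limit ≤ k → pvCanon cs k limit = cs := by
  induction cs with
  | nil => simp [pvCanon]
  | cons c t ih =>
    intro k limit h
    rw [pvCanon, if_neg (by omega), ih k limit h]

theorem pvA_canon (cs : List Char) : ∀ (k limit : Nat),
    ((((pvPos cs 0).take (limit - k)).foldl (fun (s : List (List Char) × Nat) a =>
      (s.1.set a (if s.2 % 2 = 0 then "<b>".toList else "</b>".toList), s.2 + 1))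
      (cs.map (fun c => [c]), k)).1.foldl (fun acc x => acc ++ x) [])
    = pvCanon cs k limit := by
  induction cs with
  | nil => intro k limit; simp [pvPos, pvCanon]
  | cons c t ih =>
    intro k limit
    by_cases hc : c = '*'
    · subst hc
      have e1 : pvPos ('*' :: t) 0 = 0 :: pvPos t 1 := by simp [pvPos]
      by_cases hk : k < limit
      · have hm : limit - k = (limit - (k + 1)) + 1 := by omega
        rw [e1, hm, List.take_succ_cons, pvPos_one, ← List.map_take]
        simp only [List.map_cons, List.foldl_cons, List.set_cons_zero]
        rw [pvMut_shift]
        simp only [List.foldl_cons, List.nil_append]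
        rw [pvJoin_shift, ih (k + 1) limit]
        simp [pvCanon, pvTag, hk]
      · have hm : limit - k = 0 := by omega
        rw [e1, hm, List.take_zero, List.foldl_nil]
        simp only [List.map_cons, List.foldl_cons, List.nil_append]
        rw [pvJoin_shift, pvJoin_singletons]
        rw [pvCanon, if_neg (by omega), pvCanon_stop t k limit (by omega)]
        simp
    · have e1 : pvPos (c :: t) 0 = pvPos t 1 := by simp [pvPos, hc]
      rw [e1, pvPos_one, ← List.map_take]
      simp only [List.map_cons]
      rw [pvMut_shift]
      simp only [List.foldl_cons, List.nil_append]
      rw [pvJoin_shift, ih k limit]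
      rw [pvCanon, if_neg (by simp [hc])]
      simp

theorem pvLoop1 (cs : List Char) : ∀ (c0 n0 : Nat) (acc : List Nat),
    (cs.map (fun c => [c])).foldl (fun (s : Nat × Nat × List Nat) ch =>
      if ch = ['*'] then (s.1 + 1, s.2.1 + 1, s.2.2 ++ [s.1])
      else (s.1 + 1, s.2.1, s.2.2)) (c0, n0, acc)
    = (c0 + cs.length, n0 + cs.count '*', acc ++ pvPos cs c0) := by
  induction cs with
  | nil => simp [pvPos]
  | cons c t ih =>
    intro c0 n0 acc
    by_cases h : c = '*'
    · simp [h, pvPos, ih, List.append_assoc]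
      omega
    · simp [h, pvPos, ih]
      omega

-- ---- B-side lemmas ----

theorem pySplitStar_ne_nil (cs : List Char) : pySplitStar cs ≠ [] := by
  cases cs with
  | nil => simp [pySplitStar]
  | cons c t =>
    rw [pySplitStar]
    rcases h : pySplitStar t with _ | ⟨p, ps⟩
    · simp
    · by_cases hc : c = '*' <;> simp [hc]

theorem pySplitStar_length (cs : List Char) :
    (pySplitStar cs).length = cs.count '*' + 1 := by
  induction cs with
  | nil => simp [pySplitStar]
  | cons c t ih =>
    rw [pySplitStar]
    rcases h : pySplitStar t with _ | ⟨p, ps⟩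
    · exact absurd h (pySplitStar_ne_nil t)
    · rw [h] at ih
      by_cases hc : c = '*' <;> simp [hc, ← ih]

-- rejoin parts with alternating tags; an unpaired trailing separator stays '*'
def pvAsm : List (List Char) → Nat → Nat → List Char
  | [], _, _ => []
  | [p], _, _ => p
  | p :: q :: rest, k, limit =>
    p ++ (if k < limit then pvTag k else ['*']) ++ pvAsm (q :: rest) (k + 1) limit

theorem pvSplit_canon (cs : List Char) : ∀ (k limit : Nat),
    pvAsm (pySplitStar cs) k limit = pvCanon cs k limit := by
  induction cs with
  | nil => intro k limit; simp [pySplitStar, pvAsm, pvCanon]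
  | cons c t ih =>
    intro k limit
    rcases h : pySplitStar t with _ | ⟨p, ps⟩
    · exact absurd h (pySplitStar_ne_nil t)
    · have e : pySplitStar (c :: t) = if c = '*' then [] :: p :: ps else (c :: p) :: ps := by
        rw [pySplitStar, h]
      rw [e]
      by_cases hc : c = '*'
      · subst hc
        rw [if_pos rfl, pvCanon]
        by_cases hk : k < limit
        · rw [if_pos ⟨rfl, hk⟩, pvAsm, if_pos hk, ← h, ih]
          simp
        · rw [if_neg (by simp [hk]), pvAsm, if_neg hk, ← h, ih]
          simp [pvCanon_stop t (k + 1) limit (by omega),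
                pvCanon_stop t k limit (by omega)]
      · rw [if_neg hc, pvCanon, if_neg (by simp [hc]), ← ih k limit, h]
        cases ps with
        | nil => simp [pvAsm]
        | cons q qs => simp [pvAsm, List.append_assoc]

theorem pvMod_two (k : Int) (_hk : 0 ≤ k) : PySem.Int.mod k 2 = k % 2 := by
  have h2 : Int.fmod k 2 = k % 2 := by rw [Int.fmod_eq_emod]; simp
  simp [PySem.Int.mod, h2]

theorem pvEnumNil (s : Int) : PySem.List.enumerate ([] : List (List Char)) s = [] := rfl

theorem pvEnumCons (x : List Char) (xs : List (List Char)) (s : Int) :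
    PySem.List.enumerate (x :: xs) s = (s, x) :: PySem.List.enumerate xs (s + 1) := rfl

theorem pvB_fold (nI limI : Int) (limN : Nat) (hlim : limI = (limN : Int))
    (hle : limI ≤ nI) :
    ∀ (parts : List (List Char)) (k : Nat) (acc : List (List Char)),
    parts ≠ [] → (k : Int) + parts.length - 1 = nI →
    ((PySem.List.enumerate parts (k : Int)).foldl (fun acc ip =>
      if ip.1 < limI then
        acc ++ [ip.2] ++ [if PySem.Int.mod ip.1 2 = 0 then "<b>".toList else "</b>".toList]
      else if ip.1 < nI then acc ++ [ip.2] ++ [['*']]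
      else acc ++ [ip.2]) acc).flatten
    = acc.flatten ++ pvAsm parts k limN := by
  intro parts
  induction parts with
  | nil => intro k acc h; exact absurd rfl h
  | cons p rest ih =>
    intro k acc _ hn
    rw [pvEnumCons]
    cases rest with
    | nil =>
      have hk : nI = (k : Int) := by simp at hn; omega
      rw [pvEnumNil]
      simp only [List.foldl_cons, List.foldl_nil]
      rw [if_neg (by omega), if_neg (by omega)]
      simp [pvAsm]
    | cons q rs =>
      have hkn : (k : Int) < nI := by simp at hn; omega
      simp only [List.foldl_cons]
      have hstep : ((k : Int) + 1) = ((k + 1 : Nat) : Int) := by push_cast; ring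
      rw [hstep]
      have hn' : ((k + 1 : Nat) : Int) + (q :: rs).length - 1 = nI := by
        simp only [List.length_cons] at hn ⊢
        push_cast at hn ⊢
        omega
      by_cases hkl : (k : Int) < limI
      · rw [if_pos hkl]
        rw [ih (k + 1) _ (by simp) hn']
        rw [pvAsm, if_pos (show k < limN by omega), pvTag,
            pvMod_two _ (Int.natCast_nonneg k)]
        by_cases hm : k % 2 = 0
        · rw [if_pos (show ((k : Int) % 2 = 0) by omega), if_pos hm]
          simp [List.append_assoc]
        · rw [if_neg (show ¬ ((k : Int) % 2 = 0) by omega), if_neg hm]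
          simp [List.append_assoc]
      · rw [if_neg hkl, if_pos hkn]
        rw [ih (k + 1) _ (by simp) hn']
        rw [pvAsm, if_neg (show ¬ k < limN by omega)]
        simp [List.append_assoc]

-- ===== VERDICT =====
theorem makeBold_spec : Claim_equal_makeBold := by
  intro message _
  show makeBold message = makeBold_alt message
  unfold makeBold makeBold_alt
  dsimp only
  generalize (PySem.Str.replace (PySem.Str.replace (PySem.Str.replace (PySem.Str.replace (PySem.Str.replace message "<" "&lt;") ">" "&gt;") "&" "&amp;") "\"" "&quot;") "'" "&#39;") = m
  rw [pvLoop1]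
  simp only [Nat.zero_add, List.nil_append]
  have hlen := pvPos_length m.toList 0
  set cnt := m.toList.count '*' with hcnt
  set limN : Nat := cnt - cnt % 2 with hlimN
  have hidx : (if cnt % 2 = 1 then (pvPos m.toList 0).dropLast else pvPos m.toList 0)
      = (pvPos m.toList 0).take (limN - 0) := by
    rw [Nat.sub_zero, hlimN]
    by_cases h : cnt % 2 = 1
    · rw [if_pos h, List.dropLast_eq_take, hlen]
      congr 1
      omega
    · rw [if_neg h]
      have : cnt - cnt % 2 = cnt := by omega
      rw [this, ← hlen, List.take_length]
  rw [hidx, pvA_canon]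
  -- B side
  have hsl := pySplitStar_length m.toList
  have e0 : PySem.List.enumerate (pySplitStar m.toList) 0
      = PySem.List.enumerate (pySplitStar m.toList) (((0 : Nat) : Int)) := rfl
  rw [e0,
      pvB_fold ((pySplitStar m.toList).length - 1)
        (((pySplitStar m.toList).length : Int) - 1 -
          PySem.Int.mod (((pySplitStar m.toList).length : Int) - 1) 2)
        limN
        (by rw [hsl, pvMod_two _ (by push_cast; omega)]; push_cast; omega)
        (by rw [pvMod_two _ (by rw [hsl]; push_cast; omega)]; omega)
        (pySplitStar m.toList) 0 [] (pySplitStar_ne_nil _) (by push_cast; ring),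
      pvSplit_canon]
  simp
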